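-- pv_equiv track=rewrite | github.com/valmir-filho/python | codewars/files-400-to-499/challenge427.py | party_people
-- ===== SOURCE A (Python) =====
-- def party_people(lst):
--     n = len(lst)
--
--     while True:
--         # filtra quem pode ficar.
--         new_lst = [x for x in lst if x <= n]
--
--         # se ninguém saiu, terminou.
--         if len(new_lst) == n:
--             return n
--
--         # atualiza lista e tamanho.
--         lst = new_lst
--         n = len(lst)
-- ===== SOURCE B (Python) =====
-- def party_people(lst):
--     # Sort once, then scan k = len..0 for the greatest k such that exactly k
--     # elements are <= k (checked via two boundary comparisons in the sorted list).
--     s = sorted(lst)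
--     m = len(s)
--     for k in range(m, -1, -1):
--         if (k == m or s[k] > k) and (k == 0 or s[k - 1] <= k):
--             return k
-- ===== Notes on version B (the rewrite author's own statement) =====
-- stated objective: alternative
-- what changed: A repeatedly filters the list against its shrinking length until a fixpoint; B sorts once and scans k from len down to 0, recognising the greatest k with exactly k elements <= k via two boundary comparisons in the sorted list.
import Mathlib
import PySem

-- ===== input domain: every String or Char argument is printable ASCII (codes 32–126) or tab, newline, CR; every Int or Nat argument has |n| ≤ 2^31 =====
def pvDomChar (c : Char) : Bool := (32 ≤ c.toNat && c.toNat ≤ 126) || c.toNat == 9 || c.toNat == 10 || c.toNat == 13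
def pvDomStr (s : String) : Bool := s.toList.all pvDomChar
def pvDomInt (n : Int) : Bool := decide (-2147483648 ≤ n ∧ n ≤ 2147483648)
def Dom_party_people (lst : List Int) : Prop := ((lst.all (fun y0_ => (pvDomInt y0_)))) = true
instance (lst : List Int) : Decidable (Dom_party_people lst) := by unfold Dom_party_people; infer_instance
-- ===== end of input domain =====

-- B replaces A's repeated-filter fixpoint loop with one sort followed by a single
-- downward scan checking two boundary elements of the sorted list (objective: alternative).

-- ===== PORT A =====
-- literal port of A: repeatedly filter x <= len(lst) until nothing is removed
-- (pvFilt is the list comprehension [x for x in lst if x <= n])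
def pvFilt (lst : List Int) (n : Nat) : List Int :=
  lst.filter (fun x => decide (x ≤ (n : Int)))

def party_people (lst : List Int) : Int :=
  let n := lst.length
  let new_lst := pvFilt lst n
  if h : new_lst.length = n then (n : Int) else party_people new_lst
termination_by lst.length
decreasing_by
  exact lt_of_le_of_ne (List.length_filter_le _ _) h

-- ===== PORT B =====
-- the for-k-in-range(m,-1,-1) loop of Source B as a countdown recursion; the Python
-- loop always returns before falling through (a fixpoint always exists, proved
-- below), so the value at the unreachable fallthrough case is arbitrary (0).
def pvScan (s : List Int) (k : Nat) : Int :=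
  if (k = s.length ∨ (k : Int) < s.getD k 0) ∧ (k = 0 ∨ s.getD (k - 1) 0 ≤ (k : Int)) then
    (k : Int)
  else
    match k with
    | 0 => 0
    | k' + 1 => pvScan s k'

def party_people_alt (lst : List Int) : Int :=
  let s := PySem.List.sorted lst (fun x => x)
  pvScan s s.length

-- ===== PRECONDITION & SPEC =====
def Spec_party_people (lst : List Int) (out : Int) : Prop := out = party_people_alt lst
instance (lst : List Int) (out : Int) : Decidable (Spec_party_people lst out) := by unfold Spec_party_people; infer_instance

-- ===== CLAIM (what is proved, stated in full; the proofs are below) =====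
def Claim_equal_party_people : Prop := ∀ (lst : List Int), Dom_party_people lst → Spec_party_people lst (party_people lst)

-- ===== LEMMAS AND PROOFS =====

-- number of elements ≤ k
def pvCnt (lst : List Int) (k : Nat) : Nat := lst.countP (fun x => decide (x ≤ (k : Int)))

theorem pvCnt_le (lst : List Int) (k : Nat) : pvCnt lst k ≤ lst.length :=
  List.countP_le_length

theorem pvCnt_mono (lst : List Int) {j k : Nat} (h : j ≤ k) : pvCnt lst j ≤ pvCnt lst k := by
  apply List.countP_mono_left
  intro x _ hx
  simp only [decide_eq_true_eq] at *
  omega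

theorem pvCnt_filter (lst : List Int) {k n : Nat} (h : k ≤ n) :
    pvCnt (pvFilt lst n) k = pvCnt lst k := by
  unfold pvCnt pvFilt
  rw [List.countP_filter]
  apply List.countP_congr
  intro x _
  by_cases hx : x ≤ (k : Int)
  · have : x ≤ (n : Int) := by omega
    simp [hx, this]
  · simp [hx]

-- A's result: the greatest fixpoint of pvCnt bounded by the length
theorem partyA_spec (lst : List Int) :
    ∃ r : Nat, party_people lst = (r : Int) ∧ r ≤ lst.length ∧ pvCnt lst r = r ∧
      (∀ k : Nat, k ≤ lst.length → pvCnt lst k = k → k ≤ r) := by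
  generalize hN : lst.length = N
  induction N using Nat.strong_induction_on generalizing lst with
  | _ N ih =>
    rw [party_people]
    set n := lst.length with hn
    set new_lst := pvFilt lst n with hnew
    have hcnt : new_lst.length = pvCnt lst n := by
      simp [hnew, pvFilt, pvCnt, List.countP_eq_length_filter]
    by_cases h : new_lst.length = n
    · rw [dif_pos h]
      refine ⟨n, rfl, by omega, by omega, ?_⟩
      intro k hk _; omega
    · rw [dif_neg h]
      have hlt : new_lst.length < n := lt_of_le_of_ne (List.length_filter_le _ _) h
      obtain ⟨r, hr1, hr2, hr3, hr4⟩ := ih new_lst.length (by omega) new_lst rfl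
      refine ⟨r, hr1, by omega, ?_, ?_⟩
      · rw [← pvCnt_filter lst (n := n) (by omega : r ≤ n)]
        exact hr3
      · intro k hkN hfix
        have hk : k ≤ n := by omega
        have hk' : k ≤ pvCnt lst n := by
          calc k = pvCnt lst k := hfix.symm
          _ ≤ pvCnt lst n := pvCnt_mono lst (by omega)
        apply hr4 k (by omega)
        rw [pvCnt_filter lst (n := n) (by omega : k ≤ n)]
        exact hfix

-- on a sorted list, the two boundary comparisons characterise "exactly k elements ≤ k"
theorem pvCond_iff (s : List Int)
    (hmono : ∀ (i j : Nat) (hij : i ≤ j) (hj : j < s.length), s[i]'(Nat.lt_of_le_of_lt hij hj) ≤ s[j])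
    (k : Nat) (hk : k ≤ s.length) :
    ((k = s.length ∨ (k : Int) < s.getD k 0) ∧ (k = 0 ∨ s.getD (k - 1) 0 ≤ (k : Int)))
      ↔ pvCnt s k = k := by
  have hsplit : pvCnt s k = pvCnt (s.take k) k + pvCnt (s.drop k) k := by
    conv_lhs => rw [← List.take_append_drop k s]
    exact List.countP_append
  constructor
  · rintro ⟨h1, h2⟩
    have htake : pvCnt (s.take k) k = k := by
      have : pvCnt (s.take k) k = (s.take k).length := by
        apply List.countP_eq_length.mpr
        intro a ha
        obtain ⟨i, hi, rfl⟩ := List.getElem_of_mem ha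
        have hik : i < k := by rw [List.length_take] at hi; omega
        rcases h2 with h2 | h2
        · omega
        · have hlt : k - 1 < s.length := by omega
          have := hmono i (k - 1) (by omega) hlt
          rw [List.getElem_take]
          rw [List.getD_eq_getElem s 0 hlt] at h2
          simp only [decide_eq_true_eq]
          omega
      rw [this, List.length_take]; omega
    have hdrop : pvCnt (s.drop k) k = 0 := by
      apply List.countP_eq_zero.mpr
      intro a ha
      obtain ⟨i, hi, rfl⟩ := List.getElem_of_mem ha
      rw [List.getElem_drop]
      have hki : k + i < s.length := by rw [List.length_drop] at hi; omega
      rcases h1 with h1 | h1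
      · omega
      · have hklt : k < s.length := by omega
        have := hmono k (k + i) (by omega) hki
        rw [List.getD_eq_getElem s 0 hklt] at h1
        simp only [decide_eq_true_eq]
        omega
    omega
  · intro hfix
    constructor
    · by_contra hc
      rw [not_or] at hc
      obtain ⟨hne, hle⟩ := hc
      have hklt : k < s.length := by omega
      rw [List.getD_eq_getElem s 0 hklt] at hle
      have htake : pvCnt (s.take (k + 1)) (k) = k + 1 := by
        have : pvCnt (s.take (k + 1)) k = (s.take (k + 1)).length := by
          apply List.countP_eq_length.mpr
          intro a ha
          obtain ⟨i, hi, rfl⟩ := List.getElem_of_mem ha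
          have hik : i < k + 1 := by rw [List.length_take] at hi; omega
          have := hmono i k (by omega) hklt
          rw [List.getElem_take]
          simp only [decide_eq_true_eq]
          omega
        rw [this, List.length_take]; omega
      have : pvCnt s k = pvCnt (s.take (k + 1)) k + pvCnt (s.drop (k + 1)) k := by
        conv_lhs => rw [← List.take_append_drop (k + 1) s]
        exact List.countP_append
      omega
    · by_contra hc
      rw [not_or] at hc
      obtain ⟨hne, hgt⟩ := hc
      have hklt : k - 1 < s.length := by omega
      rw [List.getD_eq_getElem s 0 hklt] at hgt
      have hdrop : pvCnt (s.drop (k - 1)) k = 0 := by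
        apply List.countP_eq_zero.mpr
        intro a ha
        obtain ⟨i, hi, rfl⟩ := List.getElem_of_mem ha
        rw [List.getElem_drop]
        have hki : k - 1 + i < s.length := by rw [List.length_drop] at hi; omega
        have := hmono (k - 1) (k - 1 + i) (by omega) hki
        simp only [decide_eq_true_eq]
        omega
      have hsplit' : pvCnt s k = pvCnt (s.take (k - 1)) k + pvCnt (s.drop (k - 1)) k := by
        conv_lhs => rw [← List.take_append_drop (k - 1) s]
        exact List.countP_append
      have : pvCnt (s.take (k - 1)) k ≤ k - 1 := by
        calc pvCnt (s.take (k - 1)) k ≤ (s.take (k - 1)).length := pvCnt_le _ _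
        _ ≤ k - 1 := by rw [List.length_take]; omega
      omega

-- the downward scan returns the greatest fixpoint below its start
theorem pvScan_spec (s : List Int)
    (hmono : ∀ (i j : Nat) (hij : i ≤ j) (hj : j < s.length), s[i]'(Nat.lt_of_le_of_lt hij hj) ≤ s[j])
    (k : Nat) (hk : k ≤ s.length) (r : Nat) (hr : r ≤ k) (hfix : pvCnt s r = r)
    (hmax : ∀ j : Nat, r < j → j ≤ k → pvCnt s j ≠ j) :
    pvScan s k = (r : Int) := by
  induction k with
  | zero =>
    have : r = 0 := by omega
    subst this
    rw [pvScan]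
    rw [if_pos ((pvCond_iff s hmono 0 (by omega)).mpr hfix)]
  | succ k' ihk =>
    rw [pvScan]
    by_cases hcase : r = k' + 1
    · subst hcase
      rw [if_pos ((pvCond_iff s hmono (k' + 1) hk).mpr hfix)]
    · have hne : pvCnt s (k' + 1) ≠ k' + 1 := hmax (k' + 1) (by omega) (le_refl _)
      rw [if_neg (fun hcond => hne ((pvCond_iff s hmono (k' + 1) hk).mp hcond))]
      exact ihk (by omega) (by omega) (fun j hj1 hj2 => hmax j hj1 (by omega))

-- ===== VERDICT (by name: the statement is the Claim_ definition above) =====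
theorem party_people_spec : Claim_equal_party_people := by
  intro lst _
  unfold Spec_party_people party_people_alt
  set s := PySem.List.sorted lst (fun x => x) with hs
  have hperm : s.Perm lst := PySem.List.sorted_perm lst (fun x => x) false
  have hlen : s.length = lst.length := PySem.List.length_sorted lst (fun x => x) false
  have hcnt : ∀ j : Nat, pvCnt s j = pvCnt lst j := fun j => hperm.countP_eq _
  have hmono : ∀ (i j : Nat) (hij : i ≤ j) (hj : j < s.length), s[i]'(Nat.lt_of_le_of_lt hij hj) ≤ s[j] := by
    intro i j hij hj
    have hj' : j < (PySem.List.sorted lst (fun x => x)).length := by rw [hs] at hj; exact hj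
    have := PySem.List.sorted_id_getElem_mono lst hij hj'
    simp only [hs]
    exact this
  obtain ⟨r, hr1, hr2, hr3, hr4⟩ := partyA_spec lst
  rw [hr1]
  symm
  apply pvScan_spec s hmono s.length (le_refl _) r (by omega)
  · rw [hcnt]; exact hr3
  · intro j hj1 hj2 hfix
    have : j ≤ r := hr4 j (by omega) (by rw [← hcnt]; exact hfix)
    omega
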